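-- pv_equiv track=rewrite | github.com/mic-AI-chatbot/mic-AI | tools/notion_ai_tool.py | _find_page_or_item_title
-- ===== SOURCE A (Python) =====
-- from typing import Dict, Any, List, Optional
--
-- SIMULATED_NOTION_DATA = {
--     "pages": {
--         "Meeting Notes - Project Alpha": {
--             "content": "Meeting on 2023-11-15. Discussed project timeline, resource allocation, and next steps. Decision: Prioritize Feature X. Action Item: Bob to research cloud providers. Deadline: 2023-11-20.",
--             "properties": {"Status": "In Progress", "Owner": "Alice"}
--         },
--         "Research Paper on AI": {
--             "content": "Artificial intelligence (AI) is a rapidly evolving field. Machine learning, a subset of AI, focuses on algorithms that learn from data. Deep learning is a further specialization using neural networks. AI has applications in natural language processing, computer vision, and robotics. Ethical considerations are paramount in AI development.",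
--             "properties": {"Tags": ["AI", "Research"], "Summary": ""}
--         }
--     },
--     "databases": {
--         "Tasks Database": {
--             "items": {
--                 "Implement Feature Y": {"Status": "To Do", "Priority": "High", "Due Date": "2023-11-25"},
--                 "Refactor Auth Module": {"Status": "In Progress", "Priority": "Medium", "Due Date": "2023-11-30"}
--             }
--         }
--     }
-- }
--
-- def _find_page_or_item_title(prompt: str) -> Optional[str]:
--     """Helper to extract page/item title from prompt."""
--     for page_title in SIMULATED_NOTION_DATA["pages"].keys():
--         if page_title.lower() in prompt.lower():
--             return page_title
--     for db_name, db_data in SIMULATED_NOTION_DATA["databases"].items():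
--         for item_title in db_data["items"].keys():
--             if item_title.lower() in prompt.lower():
--                 return item_title
--     return None
-- ===== SOURCE B (Python) =====
-- from typing import Optional
--
-- SIMULATED_NOTION_DATA = {
--     "pages": {
--         "Meeting Notes - Project Alpha": {
--             "content": "Meeting on 2023-11-15. Discussed project timeline, resource allocation, and next steps. Decision: Prioritize Feature X. Action Item: Bob to research cloud providers. Deadline: 2023-11-20.",
--             "properties": {"Status": "In Progress", "Owner": "Alice"}
--         },
--         "Research Paper on AI": {
--             "content": "Artificial intelligence (AI) is a rapidly evolving field. Machine learning, a subset of AI, focuses on algorithms that learn from data. Deep learning is a further specialization using neural networks. AI has applications in natural language processing, computer vision, and robotics. Ethical considerations are paramount in AI development.",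
--             "properties": {"Tags": ["AI", "Research"], "Summary": ""}
--         }
--     },
--     "databases": {
--         "Tasks Database": {
--             "items": {
--                 "Implement Feature Y": {"Status": "To Do", "Priority": "High", "Due Date": "2023-11-25"},
--                 "Refactor Auth Module": {"Status": "In Progress", "Priority": "Medium", "Due Date": "2023-11-30"}
--             }
--         }
--     }
-- }
--
-- def _find_page_or_item_title(prompt: str) -> Optional[str]:
--     """Prompt-major multi-pattern scan: walk the lowered prompt once, at each
--     position mark every candidate title that starts there (startswith), then
--     return the first marked title in priority order (pages, then db items)."""
--     titles = list(SIMULATED_NOTION_DATA["pages"]) + [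
--         t for db in SIMULATED_NOTION_DATA["databases"].values() for t in db["items"]
--     ]
--     lows = [t.lower() for t in titles]
--     p = prompt.lower()
--     matched = [False] * len(titles)
--     for i in range(len(p)):
--         matched = [b or p.startswith(tl, i) for tl, b in zip(lows, matched)]
--     for t, m in zip(titles, matched):
--         if m:
--             return t
--     return None
-- ===== Notes on version B (the rewrite author's own statement) =====
-- stated objective: alternative
-- what changed: Inverts the traversal: instead of A's per-title substring tests with early return (two top-level loops plus a nested items loop), B walks the lowered prompt once, marking at each position every candidate title that starts there (startswith multi-pattern scan), then returns the first marked title in priority order.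
import Mathlib
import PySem

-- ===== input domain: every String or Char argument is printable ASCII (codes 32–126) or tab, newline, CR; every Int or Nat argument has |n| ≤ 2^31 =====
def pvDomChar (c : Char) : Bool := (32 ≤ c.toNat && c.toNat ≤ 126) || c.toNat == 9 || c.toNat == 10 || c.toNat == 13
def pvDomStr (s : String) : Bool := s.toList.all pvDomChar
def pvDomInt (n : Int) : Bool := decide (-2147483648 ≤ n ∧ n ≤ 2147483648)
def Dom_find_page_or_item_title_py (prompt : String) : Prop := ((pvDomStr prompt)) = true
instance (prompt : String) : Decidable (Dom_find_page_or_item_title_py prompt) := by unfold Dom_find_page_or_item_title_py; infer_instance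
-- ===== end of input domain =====

-- B replaces A's title-major substring loops with a prompt-major multi-pattern scan:
-- one pass over the lowered prompt marking which titles start at each position, then a
-- priority pass over the matched flags (alternative decomposition, same cost class).


-- ===== PORT A =====
-- SIMULATED_NOTION_DATA["pages"].keys() in insertion order
def pvPageTitles : List String :=
  ["Meeting Notes - Project Alpha", "Research Paper on AI"]
-- databases: name ↦ item titles (insertion order)
def pvDatabases : List (String × List String) :=
  [("Tasks Database", ["Implement Feature Y", "Refactor Auth Module"])]

-- first loop: over page titles, early return
def pvALoopPages (prompt : String) : List String → Option String
  | [] => none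
  | t :: ts =>
    if PySem.Str.isIn (PySem.Str.lower t) (PySem.Str.lower prompt) then some t
    else pvALoopPages prompt ts

-- inner loop: over one database's item titles
def pvALoopItems (prompt : String) : List String → Option String
  | [] => none
  | t :: ts =>
    if PySem.Str.isIn (PySem.Str.lower t) (PySem.Str.lower prompt) then some t
    else pvALoopItems prompt ts

-- second loop: over databases
def pvALoopDbs (prompt : String) : List (String × List String) → Option String
  | [] => none
  | (_, items) :: rest =>
    match pvALoopItems prompt items with
    | some t => some t
    | none => pvALoopDbs prompt rest

def find_page_or_item_title_py (prompt : String) : Option String :=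
  match pvALoopPages prompt pvPageTitles with
  | some t => some t
  | none => pvALoopDbs prompt pvDatabases

-- ===== PORT B =====
-- p.startswith(tl, i) with 0 ≤ i < len(p) is ported as Chars.startswith on (p.drop i),
-- exact over code points; the final zip loop is find? then map fst.
def find_page_or_item_title_py_alt (prompt : String) : Option String :=
  let titles := pvPageTitles ++ pvDatabases.flatMap (fun db => db.2)
  let lows := titles.map (fun t => (PySem.Str.lower t).toList)
  let p := (PySem.Str.lower prompt).toList
  let matched := (List.range p.length).foldl
      (fun m i => (lows.zip m).map (fun tb => tb.2 || PySem.Chars.startswith (p.drop i) tb.1))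
      (List.replicate lows.length false)
  ((titles.zip matched).find? (fun tm => tm.2)).map (fun tm => tm.1)

-- ===== PRECONDITION & SPEC =====
def Spec_find_page_or_item_title_py (prompt : String) (out : Option String) : Prop := out = find_page_or_item_title_py_alt prompt
instance (prompt : String) (out : Option String) : Decidable (Spec_find_page_or_item_title_py prompt out) := by unfold Spec_find_page_or_item_title_py; infer_instance

-- ===== CLAIM (what is proved, stated in full; the proofs are below) =====
def Claim_equal_find_page_or_item_title_py : Prop := ∀ (prompt : String), Dom_find_page_or_item_title_py prompt → Spec_find_page_or_item_title_py prompt (find_page_or_item_title_py prompt)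

-- ===== LEMMAS AND PROOFS =====

theorem loopPages_eq_find? (prompt : String) (l : List String) :
    pvALoopPages prompt l = l.find? (fun t => PySem.Str.isIn (PySem.Str.lower t) (PySem.Str.lower prompt)) := by
  induction l with
  | nil => rfl
  | cons t ts ih =>
    simp only [pvALoopPages, List.find?]
    cases hb : PySem.Str.isIn (PySem.Str.lower t) (PySem.Str.lower prompt)
    · simpa using ih
    · simp

theorem loopItems_eq_find? (prompt : String) (l : List String) :
    pvALoopItems prompt l = l.find? (fun t => PySem.Str.isIn (PySem.Str.lower t) (PySem.Str.lower prompt)) := by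
  induction l with
  | nil => rfl
  | cons t ts ih =>
    simp only [pvALoopItems, List.find?]
    cases hb : PySem.Str.isIn (PySem.Str.lower t) (PySem.Str.lower prompt)
    · simpa using ih
    · simp

theorem loopDbs_eq_find? (prompt : String) (dbs : List (String × List String)) :
    pvALoopDbs prompt dbs
      = (dbs.flatMap (fun db => db.2)).find?
          (fun t => PySem.Str.isIn (PySem.Str.lower t) (PySem.Str.lower prompt)) := by
  induction dbs with
  | nil => rfl
  | cons db rest ih =>
    simp only [pvALoopDbs, List.flatMap_cons, List.find?_append, loopItems_eq_find?, ih]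
    cases db.2.find? (fun t => PySem.Str.isIn (PySem.Str.lower t) (PySem.Str.lower prompt)) <;> rfl

-- A's result as one find? over the flattened title list
theorem portA_eq_find? (prompt : String) :
    find_page_or_item_title_py prompt
      = (pvPageTitles ++ pvDatabases.flatMap (fun db => db.2)).find?
          (fun t => PySem.Str.isIn (PySem.Str.lower t) (PySem.Str.lower prompt)) := by
  unfold find_page_or_item_title_py
  simp only [loopPages_eq_find?, loopDbs_eq_find?, List.find?_append]
  cases pvPageTitles.find? (fun t => PySem.Str.isIn (PySem.Str.lower t) (PySem.Str.lower prompt)) <;> rfl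

theorem pv_zip_self_map {α β : Type} (l : List α) (g : α → β) :
    l.zip (l.map g) = l.map (fun a => (a, g a)) := by
  induction l with
  | nil => rfl
  | cons a as ih => simp [ih]

-- the matched-flags fold, characterised: flag j = "some scanned position starts with lows[j]"
theorem fold_matched (p : List Char) (lows : List (List Char)) (n : Nat) :
    (List.range n).foldl
        (fun m i => (lows.zip m).map (fun tb => tb.2 || PySem.Chars.startswith (p.drop i) tb.1))
        (List.replicate lows.length false)
      = lows.map (fun tl => (List.range n).any (fun i => PySem.Chars.startswith (p.drop i) tl)) := by
  induction n with
  | zero =>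
    simp [List.map_const']
  | succ n ih =>
    rw [List.range_succ, List.foldl_append, ih, List.foldl_cons, List.foldl_nil,
      pv_zip_self_map, List.map_map]
    refine List.map_congr_left (fun tl _ => ?_)
    simp

-- a nonempty pattern occurs in p iff it starts at some scanned position i < p.length
theorem any_start_eq_isIn (p tl : List Char) (h : tl ≠ []) :
    ((List.range p.length).any (fun i => PySem.Chars.startswith (p.drop i) tl))
      = PySem.Chars.isIn tl p := by
  rcases hb : PySem.Chars.isIn tl p with _ | _
  · rw [PySem.Chars.isIn_eq_false_iff] at hb
    simp only [List.any_eq_false, List.mem_range]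
    intro i _
    rcases hs : PySem.Chars.startswith (p.drop i) tl with _ | _
    · simp
    · exact absurd (List.IsInfix.trans (PySem.Chars.startswith_iff _ _ |>.mp hs).isInfix
        (List.drop_suffix i p).isInfix) hb
  · rw [← PySem.Chars.exists_prefix_drop_iff_isIn] at hb
    obtain ⟨j, hj⟩ := hb
    simp only [List.any_eq_true, List.mem_range]
    refine ⟨j, ?_, (PySem.Chars.startswith_iff _ _).mpr hj⟩
    by_contra hlt
    have : p.drop j = [] := List.drop_eq_nil_of_le (by omega)
    rw [this, List.prefix_nil] at hj
    exact h hj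

theorem portB_eq_find? (prompt : String) :
    find_page_or_item_title_py_alt prompt
      = (pvPageTitles ++ pvDatabases.flatMap (fun db => db.2)).find?
          (fun t => PySem.Str.isIn (PySem.Str.lower t) (PySem.Str.lower prompt)) := by
  have hne : ∀ t ∈ pvPageTitles ++ pvDatabases.flatMap (fun db => db.2),
      (PySem.Str.lower t).toList ≠ [] := by decide
  show (((pvPageTitles ++ pvDatabases.flatMap (fun db => db.2)).zip
      ((List.range (PySem.Str.lower prompt).toList.length).foldl
        (fun m i => ((((pvPageTitles ++ pvDatabases.flatMap (fun db => db.2)).map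
            (fun t => (PySem.Str.lower t).toList)).zip m).map
          (fun tb => tb.2 || PySem.Chars.startswith ((PySem.Str.lower prompt).toList.drop i) tb.1)))
        (List.replicate ((pvPageTitles ++ pvDatabases.flatMap (fun db => db.2)).map
            (fun t => (PySem.Str.lower t).toList)).length false))).find?
      (fun tm => tm.2)).map (fun tm => tm.1) = _
  rw [fold_matched, List.map_map]
  have hmap : ((pvPageTitles ++ pvDatabases.flatMap (fun db => db.2)).map
      ((fun tl => (List.range (PySem.Str.lower prompt).toList.length).any
          (fun i => PySem.Chars.startswith ((PySem.Str.lower prompt).toList.drop i) tl))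
        ∘ (fun t => (PySem.Str.lower t).toList)))
      = (pvPageTitles ++ pvDatabases.flatMap (fun db => db.2)).map
          (fun t => PySem.Str.isIn (PySem.Str.lower t) (PySem.Str.lower prompt)) := by
    refine List.map_congr_left (fun t ht => ?_)
    simp only [Function.comp]
    rw [any_start_eq_isIn _ _ (hne t ht)]
    simp
  rw [hmap, pv_zip_self_map, List.find?_map]
  rw [show ((fun tm : String × Bool => tm.2)
      ∘ fun t => (t, PySem.Str.isIn (PySem.Str.lower t) (PySem.Str.lower prompt)))
      = fun t => PySem.Str.isIn (PySem.Str.lower t) (PySem.Str.lower prompt) from rfl]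
  cases hf : (pvPageTitles ++ pvDatabases.flatMap (fun db => db.2)).find?
      (fun t => PySem.Str.isIn (PySem.Str.lower t) (PySem.Str.lower prompt)) <;> simp

-- ===== VERDICT (by name: the statement is the Claim_ definition above) =====
theorem find_page_or_item_title_py_spec : Claim_equal_find_page_or_item_title_py := by
  intro prompt _
  unfold Spec_find_page_or_item_title_py
  rw [portA_eq_find?, portB_eq_find?]
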